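-- pv_equiv track=rewrite | github.com/nadyahse2/Laba2_DataBase | main.py | count_bytes
-- ===== SOURCE A (Python) =====
-- def count_bytes(lis):
--     header_bytes = 0
--     delimiter_bytes = len(','.encode('utf-8'))
--
--     for i, item in enumerate(lis):
--         header_bytes += len(item.encode('utf-8'))
--         if i < len(lis) - 1:
--             header_bytes += delimiter_bytes
--
--     return header_bytes + len('\n'.encode('utf-8'))
-- ===== SOURCE B (Python) =====
-- def count_bytes(lis):
--     return len((','.join(lis) + '\n').encode('utf-8'))
-- ===== Notes on version B (the rewrite author's own statement) =====
-- stated objective: simpler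
-- what changed: B builds the actual comma-joined string with the trailing newline and measures its UTF-8 length once, instead of looping over enumerate(lis) accumulating per-item byte lengths and adding a delimiter under an index comparison.
import Mathlib
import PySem

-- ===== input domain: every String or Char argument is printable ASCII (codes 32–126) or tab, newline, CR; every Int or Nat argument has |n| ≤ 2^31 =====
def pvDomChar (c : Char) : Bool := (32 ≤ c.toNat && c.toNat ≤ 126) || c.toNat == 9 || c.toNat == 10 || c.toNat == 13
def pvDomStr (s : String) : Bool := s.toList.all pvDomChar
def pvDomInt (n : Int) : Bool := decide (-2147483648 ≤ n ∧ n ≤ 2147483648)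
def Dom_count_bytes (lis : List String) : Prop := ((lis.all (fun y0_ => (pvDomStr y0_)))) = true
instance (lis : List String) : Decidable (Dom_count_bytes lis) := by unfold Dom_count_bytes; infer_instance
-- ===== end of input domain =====

-- B builds the comma-joined string with a trailing newline and measures its length once,
-- instead of accumulating per-item lengths with an index-guarded delimiter (objective: simpler).
-- On the printable-ASCII domain, UTF-8 byte count = code-point count, so lengths are ported exactly.


-- ===== PORT A =====
-- len(x.encode('utf-8')) is ported as PySem.Str.len x: exact on the ASCII domain (1 byte per char).
def count_bytes (lis : List String) : Int :=
  let delimiter_bytes : Int := PySem.Str.len ","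
  let header_bytes : Int :=
    (PySem.List.enumerate lis 0).foldl
      (fun hb p =>
        let hb := hb + PySem.Str.len p.2
        if p.1 < PySem.List.len lis - 1 then hb + delimiter_bytes else hb) 0
  header_bytes + PySem.Str.len "\n"

-- ===== PORT B =====
-- len((','.join(lis) + '\n').encode('utf-8')): exact on the ASCII domain.
def count_bytes_alt (lis : List String) : Int :=
  PySem.Str.len (PySem.Str.join "," lis ++ "\n")

-- ===== PRECONDITION & SPEC =====
def Spec_count_bytes (lis : List String) (out : Int) : Prop := out = count_bytes_alt lis
instance (lis : List String) (out : Int) : Decidable (Spec_count_bytes lis out) := by unfold Spec_count_bytes; infer_instance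

-- ===== CLAIM (what is proved, stated in full; the proofs are below) =====
def Claim_equal_count_bytes : Prop := ∀ (lis : List String), Dom_count_bytes lis → Spec_count_bytes lis (count_bytes lis)

-- ===== LEMMAS AND PROOFS =====

-- length of ','.join(l) plus guards, as a structural recursion
def jlen : List String → Int
  | [] => 0
  | [x] => PySem.Str.len x
  | x :: y :: t => PySem.Str.len x + 1 + jlen (y :: t)

theorem jlen_join (lis : List String) :
    ((PySem.Chars.join (",".toList) (lis.map String.toList)).length : Int) = jlen lis := by
  induction lis with
  | nil => simp [PySem.Chars.join_nil, jlen]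
  | cons x t ih =>
    cases t with
    | nil => simp [PySem.Chars.join_singleton, jlen]
    | cons y u =>
      rw [List.map_cons, List.map_cons, PySem.Chars.join_cons_cons]
      rw [List.map_cons] at ih
      simp only [jlen, List.length_append, PySem.Str.len_eq]
      push_cast
      rw [show (",".toList) = [','] from rfl] at ih
      rw [ih]
      simp

theorem jlen_alt (lis : List String) : count_bytes_alt lis = jlen lis + 1 := by
  unfold count_bytes_alt
  rw [PySem.Str.len_append]
  rw [show PySem.Str.len "\n" = 1 from rfl]
  have h := jlen_join lis
  simp only [PySem.Str.len_eq] at *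
  rw [PySem.Str.toList_join] at *
  omega

theorem fold_eq_jlen (lis : List String) :
    ∀ (l : List String) (s : Int) (acc : Int), s + l.length = lis.length →
      (PySem.List.enumerate l s).foldl
        (fun hb p =>
          if p.1 < PySem.List.len lis - 1 then hb + PySem.Str.len p.2 + 1
          else hb + PySem.Str.len p.2) acc
      = acc + jlen l := by
  intro l
  induction l with
  | nil => intro s acc h; simp [PySem.List.enumerate_nil, jlen]
  | cons x t ih =>
    intro s acc h
    rw [PySem.List.enumerate_cons, List.foldl_cons]
    cases t with
    | nil =>
      have hs : ¬ (s < PySem.List.len lis - 1) := by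
        simp only [PySem.List.len_eq]; simp at h; omega
      rw [PySem.List.enumerate_nil, List.foldl_nil, if_neg hs]
      simp [jlen]
    | cons y u =>
      have hs : s < PySem.List.len lis - 1 := by
        simp only [PySem.List.len_eq]
        simp only [List.length_cons] at h
        push_cast at h
        omega
      rw [if_pos hs, ih (s+1) _ (by simp at h ⊢; omega)]
      simp [jlen]
      ring

-- ===== VERDICT (by name: the statement is the Claim_ definition above) =====
theorem count_bytes_spec : Claim_equal_count_bytes := by
  intro lis _
  unfold Spec_count_bytes count_bytes
  simp only []
  rw [jlen_alt, show PySem.Str.len "," = 1 from rfl, fold_eq_jlen lis lis 0 0 (by simp),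
    show PySem.Str.len "\n" = 1 from rfl]
  ring
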